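-- pv_equiv track=rewrite | github.com/arkanwolfshade/MythosMUD | scripts/migrate_rooms.py | determine_zone_type
-- ===== SOURCE A (Python) =====
-- def determine_zone_type(zone_name: str) -> str:
--     """
--     Determine the zone type based on the zone name.
--
--     Args:
--         zone_name: Name of the zone
--
--     Returns:
--         Zone type string
--     """
--     zone_name_lower = zone_name.lower()
--
--     if any(word in zone_name_lower for word in ["city", "town", "burg"]):
--         return "city"
--     elif any(word in zone_name_lower for word in ["forest", "woods", "grove"]):
--         return "countryside"
--     elif any(word in zone_name_lower for word in ["mountain", "peak", "ridge"]):
--         return "mountains"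
--     elif any(word in zone_name_lower for word in ["swamp", "marsh", "bog"]):
--         return "swamp"
--     elif any(word in zone_name_lower for word in ["desert", "dune", "waste"]):
--         return "desert"
--     elif any(word in zone_name_lower for word in ["tundra", "ice", "frozen"]):
--         return "tundra"
--     else:
--         return "city"  # Default
-- ===== SOURCE B (Python) =====
-- # B: single left-to-right scan of the lowered string; at each position it checks
-- # which keywords START there (via startswith) and keeps the minimum zone priority
-- # seen anywhere, instead of running a separate substring search per keyword group.
-- _KEYWORD_PRIORITY = {
--     "city": 0, "town": 0, "burg": 0,
--     "forest": 1, "woods": 1, "grove": 1,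
--     "mountain": 2, "peak": 2, "ridge": 2,
--     "swamp": 3, "marsh": 3, "bog": 3,
--     "desert": 4, "dune": 4, "waste": 4,
--     "tundra": 5, "ice": 5, "frozen": 5,
-- }
-- _ZONES = ["city", "countryside", "mountains", "swamp", "desert", "tundra"]
--
--
-- def determine_zone_type(zone_name: str) -> str:
--     s = zone_name.lower()
--     best = 6
--     for i in range(len(s)):
--         for kw, pri in _KEYWORD_PRIORITY.items():
--             if pri < best and s.startswith(kw, i):
--                 best = pri
--     return _ZONES[best] if best < 6 else "city"
-- ===== Notes on version B (the rewrite author's own statement) =====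
-- stated objective: alternative
-- what changed: B makes one left-to-right pass over the lowered string, at each position testing which keywords start there and accumulating the minimum zone priority, instead of A's per-group substring-search cascade with early return.
import Mathlib
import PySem

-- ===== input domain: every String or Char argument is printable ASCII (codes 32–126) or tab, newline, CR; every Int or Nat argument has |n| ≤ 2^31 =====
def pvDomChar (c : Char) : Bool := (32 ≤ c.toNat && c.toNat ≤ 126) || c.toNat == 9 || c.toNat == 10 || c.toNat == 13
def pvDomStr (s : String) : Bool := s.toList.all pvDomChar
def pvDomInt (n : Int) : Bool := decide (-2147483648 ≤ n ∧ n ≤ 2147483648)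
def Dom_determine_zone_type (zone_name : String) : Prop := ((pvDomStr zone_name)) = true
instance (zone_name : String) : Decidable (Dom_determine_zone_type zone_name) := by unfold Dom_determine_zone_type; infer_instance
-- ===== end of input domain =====

-- B scans the lowered string once, taking the minimum zone priority of keywords starting at each position, instead of A's per-group substring cascade; same return value.
-- ===== PORT A =====
def determine_zone_type (zone_name : String) : String :=
  let zone_name_lower := PySem.Str.lower zone_name
  if ["city", "town", "burg"].any (fun word => PySem.Str.isIn word zone_name_lower) then "city"
  else if ["forest", "woods", "grove"].any (fun word => PySem.Str.isIn word zone_name_lower) then "countryside"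
  else if ["mountain", "peak", "ridge"].any (fun word => PySem.Str.isIn word zone_name_lower) then "mountains"
  else if ["swamp", "marsh", "bog"].any (fun word => PySem.Str.isIn word zone_name_lower) then "swamp"
  else if ["desert", "dune", "waste"].any (fun word => PySem.Str.isIn word zone_name_lower) then "desert"
  else if ["tundra", "ice", "frozen"].any (fun word => PySem.Str.isIn word zone_name_lower) then "tundra"
  else "city"

-- ===== PORT B =====
-- the flat keyword → priority map of Source B (dict iterated in insertion order)
def kwPriority : List (List Char × Nat) :=
  [("city".toList, 0), ("town".toList, 0), ("burg".toList, 0),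
   ("forest".toList, 1), ("woods".toList, 1), ("grove".toList, 1),
   ("mountain".toList, 2), ("peak".toList, 2), ("ridge".toList, 2),
   ("swamp".toList, 3), ("marsh".toList, 3), ("bog".toList, 3),
   ("desert".toList, 4), ("dune".toList, 4), ("waste".toList, 4),
   ("tundra".toList, 5), ("ice".toList, 5), ("frozen".toList, 5)]

def zonesB : List String := ["city", "countryside", "mountains", "swamp", "desert", "tundra"]

-- inner loop body: `if pri < best and s.startswith(kw, i): best = pri`
def stepB (c : List Char) (i : Nat) (best : Nat) (p : List Char × Nat) : Nat :=
  if p.2 < best ∧ p.1.isPrefixOf (c.drop i) then p.2 else best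

-- one position of the outer loop: fold the keyword map
def scanPos (c : List Char) (best : Nat) (i : Nat) : Nat :=
  kwPriority.foldl (stepB c i) best

def determine_zone_type_alt (zone_name : String) : String :=
  let c := (PySem.Str.lower zone_name).toList
  let best := (List.range c.length).foldl (scanPos c) 6
  if best < 6 then zonesB.getD best "city" else "city"

-- ===== PRECONDITION & SPEC =====
def Spec_determine_zone_type (zone_name : String) (out : String) : Prop := out = determine_zone_type_alt zone_name
instance (zone_name : String) (out : String) : Decidable (Spec_determine_zone_type zone_name out) := by unfold Spec_determine_zone_type; infer_instance

-- ===== CLAIM (what is proved, stated in full; the proofs are below) =====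
def Claim_equal_determine_zone_type : Prop := ∀ (zone_name : String), Dom_determine_zone_type zone_name → Spec_determine_zone_type zone_name (determine_zone_type zone_name)

-- ===== LEMMAS AND PROOFS =====

-- a fold whose step never increases the accumulator stays ≤ the initial value
theorem pv_foldl_le_init {α : Type} (f : Nat → α → Nat) (h : ∀ b x, f b x ≤ b) :
    ∀ (l : List α) (b : Nat), l.foldl f b ≤ b := by
  intro l
  induction l with
  | nil => intro b; simp
  | cons x t ih => intro b; exact le_trans (ih (f b x)) (h b x)

theorem pv_step_le (c : List Char) (i : Nat) (b : Nat) (p : List Char × Nat) :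
    stepB c i b p ≤ b := by
  unfold stepB; split
  · omega
  · exact le_refl b

theorem pv_scan_le (c : List Char) (b i : Nat) : scanPos c b i ≤ b :=
  pv_foldl_le_init _ (pv_step_le c i) _ b

-- if some element of the list forces the accumulator below m, the fold result is ≤ m
theorem pv_foldl_le_of_mem {α : Type} (f : Nat → α → Nat) (h : ∀ b x, f b x ≤ b)
    (x : α) (m : Nat) (hx : ∀ b, f b x ≤ m) :
    ∀ (l : List α) (b : Nat), x ∈ l → l.foldl f b ≤ m := by
  intro l
  induction l with
  | nil => intro b hb; simp at hb
  | cons y t ih =>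
      intro b hb
      rcases List.mem_cons.mp hb with rfl | hmem
      · exact le_trans (pv_foldl_le_init f h t (f b x)) (hx b)
      · exact ih (f b y) hmem

-- inner fold: ≤ the priority of any keyword matching at position i
theorem pv_scan_le_matched (c : List Char) (i b : Nat) (p : List Char × Nat)
    (hp : p ∈ kwPriority) (hpref : p.1 <+: c.drop i) : scanPos c b i ≤ p.2 := by
  unfold scanPos
  refine pv_foldl_le_of_mem _ (pv_step_le c i) p p.2 ?_ kwPriority b hp
  intro b'
  have hb : p.1.isPrefixOf (c.drop i) = true := List.isPrefixOf_iff_prefix.mpr hpref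
  unfold stepB
  split
  · omega
  · rename_i h
    simp only [hb, and_true] at h
    omega

-- outer fold: ≤ the priority of any keyword matching at any listed position
theorem pv_best_le_matched (c : List Char) (l : List Nat) (b i : Nat) (p : List Char × Nat)
    (hi : i ∈ l) (hp : p ∈ kwPriority) (hpref : p.1 <+: c.drop i) :
    l.foldl (scanPos c) b ≤ p.2 :=
  pv_foldl_le_of_mem _ (fun b' j => pv_scan_le c b' j) i p.2
    (fun b' => pv_scan_le_matched c i b' p hp hpref) l b hi

theorem pv_scanPos_def (c : List Char) (b i : Nat) :
    scanPos c b i = kwPriority.foldl (stepB c i) b := rfl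

-- inner fold result is the start value or the priority of a keyword matching at i
theorem pv_inner_mem (c : List Char) (i : Nat) :
    ∀ (L : List (List Char × Nat)) (b : Nat),
      L.foldl (stepB c i) b = b ∨
      ∃ p ∈ L, p.1 <+: c.drop i ∧ L.foldl (stepB c i) b = p.2 := by
  intro L
  induction L with
  | nil => intro b; left; rfl
  | cons q t ih =>
      intro b
      have hstep : stepB c i b q = b ∨ (q.1 <+: c.drop i ∧ stepB c i b q = q.2) := by
        unfold stepB; split
        · rename_i h; exact Or.inr ⟨List.isPrefixOf_iff_prefix.mp h.2, rfl⟩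
        · exact Or.inl rfl
      rcases ih (stepB c i b q) with heq | ⟨p, hpmem, hppref, hpeq⟩
      · rcases hstep with h1 | ⟨h1, h2⟩
        · left; rw [List.foldl_cons, heq, h1]
        · right; exact ⟨q, List.mem_cons_self, h1, by rw [List.foldl_cons, heq, h2]⟩
      · right; exact ⟨p, List.mem_cons_of_mem _ hpmem, hppref, hpeq⟩

-- outer fold result is the start value or the priority of a keyword matching somewhere in l
theorem pv_outer_mem (c : List Char) :
    ∀ (l : List Nat) (b : Nat),
      l.foldl (scanPos c) b = b ∨
      ∃ i ∈ l, ∃ p ∈ kwPriority, p.1 <+: c.drop i ∧ l.foldl (scanPos c) b = p.2 := by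
  intro l
  induction l with
  | nil => intro b; left; rfl
  | cons j t ih =>
      intro b
      have hinner : scanPos c b j = b ∨
          ∃ p ∈ kwPriority, p.1 <+: c.drop j ∧ scanPos c b j = p.2 := by
        rw [pv_scanPos_def]; exact pv_inner_mem c j kwPriority b
      rw [List.foldl_cons]
      rcases ih (scanPos c b j) with heq | ⟨i, himem, p, hpmem, hppref, hpeq⟩
      · rw [heq]
        rcases hinner with h1 | ⟨p, hpmem, hppref, hpeq⟩
        · left; exact h1
        · right; exact ⟨j, List.mem_cons_self, p, hpmem, hppref, hpeq⟩
      · right; exact ⟨i, List.mem_cons_of_mem _ himem, p, hpmem, hppref, hpeq⟩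

-- every keyword is nonempty and has priority ≤ 5
theorem pv_kw_facts (p : List Char × Nat) (hp : p ∈ kwPriority) : p.1 ≠ [] ∧ p.2 ≤ 5 := by
  simp only [kwPriority, List.mem_cons, List.not_mem_nil, or_false] at hp
  rcases hp with rfl|rfl|rfl|rfl|rfl|rfl|rfl|rfl|rfl|rfl|rfl|rfl|rfl|rfl|rfl|rfl|rfl|rfl <;>
    exact ⟨by decide, by decide⟩

-- which group each keyword of the map belongs to
theorem pv_prio_cases (p : List Char × Nat) (hp : p ∈ kwPriority) :
    (p.2 = 0 ∧ (p.1 = "city".toList ∨ p.1 = "town".toList ∨ p.1 = "burg".toList)) ∨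
    (p.2 = 1 ∧ (p.1 = "forest".toList ∨ p.1 = "woods".toList ∨ p.1 = "grove".toList)) ∨
    (p.2 = 2 ∧ (p.1 = "mountain".toList ∨ p.1 = "peak".toList ∨ p.1 = "ridge".toList)) ∨
    (p.2 = 3 ∧ (p.1 = "swamp".toList ∨ p.1 = "marsh".toList ∨ p.1 = "bog".toList)) ∨
    (p.2 = 4 ∧ (p.1 = "desert".toList ∨ p.1 = "dune".toList ∨ p.1 = "waste".toList)) ∨
    (p.2 = 5 ∧ (p.1 = "tundra".toList ∨ p.1 = "ice".toList ∨ p.1 = "frozen".toList)) := by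
  simp only [kwPriority, List.mem_cons, List.not_mem_nil, or_false] at hp
  rcases hp with rfl|rfl|rfl|rfl|rfl|rfl|rfl|rfl|rfl|rfl|rfl|rfl|rfl|rfl|rfl|rfl|rfl|rfl <;> simp

-- a nonempty prefix of c.drop i forces i < c.length
theorem pv_lt_length_of_pref (c : List Char) (i : Nat) (w : List Char)
    (hw : w ≠ []) (h : w <+: c.drop i) : i < c.length := by
  by_contra hge
  rw [Nat.not_lt] at hge
  rw [List.drop_eq_nil_of_le hge] at h
  exact hw (List.prefix_nil.mp h)


-- a keyword matching as an infix bounds the scan result by its priority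
theorem pv_best_le_of_infix (c : List Char) (p : List Char × Nat) (hp : p ∈ kwPriority)
    (hinf : p.1 <:+: c) : (List.range c.length).foldl (scanPos c) 6 ≤ p.2 := by
  rcases hinf with ⟨u, t, rfl⟩
  have hpref : p.1 <+: (u ++ p.1 ++ t).drop u.length := by
    rw [List.append_assoc, List.drop_left]; exact List.prefix_append _ _
  have hlt : u.length < (u ++ p.1 ++ t).length :=
    pv_lt_length_of_pref _ _ _ (pv_kw_facts p hp).1 hpref
  exact pv_best_le_matched _ _ 6 u.length p (List.mem_range.mpr hlt) hp hpref

-- a match found by the scan is an infix of c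
theorem pv_infix_of_pref (c : List Char) (i : Nat) (w : List Char) (h : w <+: c.drop i) :
    w <:+: c :=
  List.infix_iff_prefix_suffix.mpr ⟨c.drop i, h, List.drop_suffix i c⟩

-- the scan result is 6 or the priority of some group whose keyword occurs in c
theorem pv_best_cases (c : List Char) :
    (List.range c.length).foldl (scanPos c) 6 = 6 ∨
    ∃ p ∈ kwPriority, p.1 <:+: c ∧ (List.range c.length).foldl (scanPos c) 6 = p.2 := by
  rcases pv_outer_mem c (List.range c.length) 6 with h | ⟨i, _, p, hp, hpref, heq⟩
  · exact Or.inl h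
  · exact Or.inr ⟨p, hp, pv_infix_of_pref c i p.1 hpref, heq⟩

-- proof-only helper: some keyword of a three-word group occurs in c
def pvG (c : List Char) (x y z : List Char) : Prop := x <:+: c ∨ y <:+: c ∨ z <:+: c

theorem pv_le_group (c : List Char) (j : Nat) (x y z : List Char)
    (hx : (x, j) ∈ kwPriority) (hy : (y, j) ∈ kwPriority) (hz : (z, j) ∈ kwPriority)
    (h : pvG c x y z) : (List.range c.length).foldl (scanPos c) 6 ≤ j := by
  rcases h with h | h | h
  exacts [pv_best_le_of_infix c (x, j) hx h, pv_best_le_of_infix c (y, j) hy h,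
          pv_best_le_of_infix c (z, j) hz h]

-- the scan result is 6 or the index of a group one of whose keywords occurs in c
theorem pv_best_group_cases (c : List Char) :
    (List.range c.length).foldl (scanPos c) 6 = 6 ∨
    ((List.range c.length).foldl (scanPos c) 6 = 0 ∧ pvG c "city".toList "town".toList "burg".toList) ∨
    ((List.range c.length).foldl (scanPos c) 6 = 1 ∧ pvG c "forest".toList "woods".toList "grove".toList) ∨
    ((List.range c.length).foldl (scanPos c) 6 = 2 ∧ pvG c "mountain".toList "peak".toList "ridge".toList) ∨
    ((List.range c.length).foldl (scanPos c) 6 = 3 ∧ pvG c "swamp".toList "marsh".toList "bog".toList) ∨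
    ((List.range c.length).foldl (scanPos c) 6 = 4 ∧ pvG c "desert".toList "dune".toList "waste".toList) ∨
    ((List.range c.length).foldl (scanPos c) 6 = 5 ∧ pvG c "tundra".toList "ice".toList "frozen".toList) := by
  rcases pv_best_cases c with h | ⟨p, hp, hinf, heq⟩
  · exact Or.inl h
  · have hG : ∀ x y z : List Char, p.1 = x ∨ p.1 = y ∨ p.1 = z → pvG c x y z := by
      rintro x y z (rfl | rfl | rfl)
      exacts [Or.inl hinf, Or.inr (Or.inl hinf), Or.inr (Or.inr hinf)]
    rcases pv_prio_cases p hp with ⟨h2,hk⟩|⟨h2,hk⟩|⟨h2,hk⟩|⟨h2,hk⟩|⟨h2,hk⟩|⟨h2,hk⟩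
    · exact Or.inr (Or.inl ⟨heq.trans h2, hG _ _ _ hk⟩)
    · exact Or.inr (Or.inr (Or.inl ⟨heq.trans h2, hG _ _ _ hk⟩))
    · exact Or.inr (Or.inr (Or.inr (Or.inl ⟨heq.trans h2, hG _ _ _ hk⟩)))
    · exact Or.inr (Or.inr (Or.inr (Or.inr (Or.inl ⟨heq.trans h2, hG _ _ _ hk⟩))))
    · exact Or.inr (Or.inr (Or.inr (Or.inr (Or.inr (Or.inl ⟨heq.trans h2, hG _ _ _ hk⟩)))))
    · exact Or.inr (Or.inr (Or.inr (Or.inr (Or.inr (Or.inr ⟨heq.trans h2, hG _ _ _ hk⟩)))))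

-- ===== VERDICT (by name: the statement is the Claim_ definition above) =====
theorem determine_zone_type_spec : Claim_equal_determine_zone_type := by
  intro zone_name _
  show determine_zone_type zone_name = determine_zone_type_alt zone_name
  simp only [determine_zone_type, determine_zone_type_alt]
  set low := PySem.Str.lower zone_name with hlow
  set c := low.toList with hc
  set best := (List.range c.length).foldl (scanPos c) 6 with hbest
  have hG := pv_best_group_cases c
  rw [← hbest] at hG
  have e0 : ((["city", "town", "burg"].any fun word => PySem.Str.isIn word low) = true) ↔ pvG c "city".toList "town".toList "burg".toList := by
    unfold pvG; rw [hc]; simp [PySem.Chars.isIn_iff_infix]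
  have e1 : ((["forest", "woods", "grove"].any fun word => PySem.Str.isIn word low) = true) ↔ pvG c "forest".toList "woods".toList "grove".toList := by
    unfold pvG; rw [hc]; simp [PySem.Chars.isIn_iff_infix]
  have e2 : ((["mountain", "peak", "ridge"].any fun word => PySem.Str.isIn word low) = true) ↔ pvG c "mountain".toList "peak".toList "ridge".toList := by
    unfold pvG; rw [hc]; simp [PySem.Chars.isIn_iff_infix]
  have e3 : ((["swamp", "marsh", "bog"].any fun word => PySem.Str.isIn word low) = true) ↔ pvG c "swamp".toList "marsh".toList "bog".toList := by
    unfold pvG; rw [hc]; simp [PySem.Chars.isIn_iff_infix]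
  have e4 : ((["desert", "dune", "waste"].any fun word => PySem.Str.isIn word low) = true) ↔ pvG c "desert".toList "dune".toList "waste".toList := by
    unfold pvG; rw [hc]; simp [PySem.Chars.isIn_iff_infix]
  have e5 : ((["tundra", "ice", "frozen"].any fun word => PySem.Str.isIn word low) = true) ↔ pvG c "tundra".toList "ice".toList "frozen".toList := by
    unfold pvG; rw [hc]; simp [PySem.Chars.isIn_iff_infix]
  by_cases h0 : pvG c "city".toList "town".toList "burg".toList
  · rw [if_pos (e0.mpr h0)]
    have hle : best ≤ 0 := by
      rw [hbest]
      exact pv_le_group c 0 _ _ _ (by simp [kwPriority]) (by simp [kwPriority]) (by simp [kwPriority]) h0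
    have hb : best = 0 := by
      rcases hG with h|⟨h,hg⟩|⟨h,hg⟩|⟨h,hg⟩|⟨h,hg⟩|⟨h,hg⟩|⟨h,hg⟩
      · omega
      · omega
      · omega
      · omega
      · omega
      · omega
      · omega
    rw [hb]; decide
  · rw [if_neg (fun hcond => h0 (e0.mp hcond))]
    by_cases h1 : pvG c "forest".toList "woods".toList "grove".toList
    · rw [if_pos (e1.mpr h1)]
      have hle : best ≤ 1 := by
        rw [hbest]
        exact pv_le_group c 1 _ _ _ (by simp [kwPriority]) (by simp [kwPriority]) (by simp [kwPriority]) h1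
      have hb : best = 1 := by
        rcases hG with h|⟨h,hg⟩|⟨h,hg⟩|⟨h,hg⟩|⟨h,hg⟩|⟨h,hg⟩|⟨h,hg⟩
        · omega
        · exact absurd hg h0
        · omega
        · omega
        · omega
        · omega
        · omega
      rw [hb]; decide
    · rw [if_neg (fun hcond => h1 (e1.mp hcond))]
      by_cases h2 : pvG c "mountain".toList "peak".toList "ridge".toList
      · rw [if_pos (e2.mpr h2)]
        have hle : best ≤ 2 := by
          rw [hbest]
          exact pv_le_group c 2 _ _ _ (by simp [kwPriority]) (by simp [kwPriority]) (by simp [kwPriority]) h2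
        have hb : best = 2 := by
          rcases hG with h|⟨h,hg⟩|⟨h,hg⟩|⟨h,hg⟩|⟨h,hg⟩|⟨h,hg⟩|⟨h,hg⟩
          · omega
          · exact absurd hg h0
          · exact absurd hg h1
          · omega
          · omega
          · omega
          · omega
        rw [hb]; decide
      · rw [if_neg (fun hcond => h2 (e2.mp hcond))]
        by_cases h3 : pvG c "swamp".toList "marsh".toList "bog".toList
        · rw [if_pos (e3.mpr h3)]
          have hle : best ≤ 3 := by
            rw [hbest]
            exact pv_le_group c 3 _ _ _ (by simp [kwPriority]) (by simp [kwPriority]) (by simp [kwPriority]) h3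
          have hb : best = 3 := by
            rcases hG with h|⟨h,hg⟩|⟨h,hg⟩|⟨h,hg⟩|⟨h,hg⟩|⟨h,hg⟩|⟨h,hg⟩
            · omega
            · exact absurd hg h0
            · exact absurd hg h1
            · exact absurd hg h2
            · omega
            · omega
            · omega
          rw [hb]; decide
        · rw [if_neg (fun hcond => h3 (e3.mp hcond))]
          by_cases h4 : pvG c "desert".toList "dune".toList "waste".toList
          · rw [if_pos (e4.mpr h4)]
            have hle : best ≤ 4 := by
              rw [hbest]
              exact pv_le_group c 4 _ _ _ (by simp [kwPriority]) (by simp [kwPriority]) (by simp [kwPriority]) h4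
            have hb : best = 4 := by
              rcases hG with h|⟨h,hg⟩|⟨h,hg⟩|⟨h,hg⟩|⟨h,hg⟩|⟨h,hg⟩|⟨h,hg⟩
              · omega
              · exact absurd hg h0
              · exact absurd hg h1
              · exact absurd hg h2
              · exact absurd hg h3
              · omega
              · omega
            rw [hb]; decide
          · rw [if_neg (fun hcond => h4 (e4.mp hcond))]
            by_cases h5 : pvG c "tundra".toList "ice".toList "frozen".toList
            · rw [if_pos (e5.mpr h5)]
              have hle : best ≤ 5 := by
                rw [hbest]
                exact pv_le_group c 5 _ _ _ (by simp [kwPriority]) (by simp [kwPriority]) (by simp [kwPriority]) h5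
              have hb : best = 5 := by
                rcases hG with h|⟨h,hg⟩|⟨h,hg⟩|⟨h,hg⟩|⟨h,hg⟩|⟨h,hg⟩|⟨h,hg⟩
                · omega
                · exact absurd hg h0
                · exact absurd hg h1
                · exact absurd hg h2
                · exact absurd hg h3
                · exact absurd hg h4
                · omega
              rw [hb]; decide
            · rw [if_neg (fun hcond => h5 (e5.mp hcond))]
              have hb : best = 6 := by
                rcases hG with h|⟨h,hg⟩|⟨h,hg⟩|⟨h,hg⟩|⟨h,hg⟩|⟨h,hg⟩|⟨h,hg⟩
                · exact h
                · exact absurd hg h0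
                · exact absurd hg h1
                · exact absurd hg h2
                · exact absurd hg h3
                · exact absurd hg h4
                · exact absurd hg h5
              rw [hb]; decide
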